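-- pv_equiv track=rewrite | github.com/Noir-swim/weareteamphys | ai.py | count_stable_discs
-- ===== SOURCE A (Python) =====
-- def count_stable_discs(board, stone):
--     stable = 0
--     directions = [(-1, -1), (-1, 0), (-1, 1), (0, -1), (0, 1), (1, -1), (1, 0), (1, 1)]
--     for y in range(len(board)):
--         for x in range(len(board[0])):
--             if board[y][x] == stone:
--                 stable_flag = True
--                 for dx, dy in directions:
--                     nx, ny = x + dx, y + dy
--                     while 0 <= nx < len(board[0]) and 0 <= ny < len(board):
--                         if board[ny][nx] != stone:
--                             stable_flag = False
--                             break
--                         nx += dx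
--                         ny += dy
--                     if not stable_flag:
--                         break
--                 if stable_flag:
--                     stable += 1
--     return stable
-- ===== SOURCE B (Python) =====
-- def count_stable_discs(board, stone):
--     h = len(board)
--     if h == 0:
--         return 0
--     w = len(board[0])
--     row_ok = [all(v == stone for v in row[:w]) for row in board]
--     col_ok = [all(row[x] == stone for row in board) for x in range(w)]
--     diag_ok = [all(board[x - i + (h - 1)][x] == stone
--                    for x in range(max(0, i - (h - 1)), min(w, i + 1)))
--                for i in range(h + w - 1)]
--     anti_ok = [all(board[i - x][x] == stone
--                    for x in range(max(0, i - (h - 1)), min(w, i + 1)))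
--                for i in range(h + w - 1)]
--     count = 0
--     for y in range(h):
--         for x in range(w):
--             if row_ok[y] and col_ok[x] and diag_ok[x - y + (h - 1)] and anti_ok[x + y]:
--                 count += 1
--     return count
-- ===== Notes on version B (the rewrite author's own statement) =====
-- stated objective: alternative
-- what changed: A tests every stone cell by walking rays to the board edge in all 8 directions; B instead precomputes one all-stone flag per row, column, diagonal and anti-diagonal and decides each cell by four table lookups (worst-case O(n^2) vs A's O(n^3), but not measurably faster on the generated inputs).
import Mathlib
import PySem

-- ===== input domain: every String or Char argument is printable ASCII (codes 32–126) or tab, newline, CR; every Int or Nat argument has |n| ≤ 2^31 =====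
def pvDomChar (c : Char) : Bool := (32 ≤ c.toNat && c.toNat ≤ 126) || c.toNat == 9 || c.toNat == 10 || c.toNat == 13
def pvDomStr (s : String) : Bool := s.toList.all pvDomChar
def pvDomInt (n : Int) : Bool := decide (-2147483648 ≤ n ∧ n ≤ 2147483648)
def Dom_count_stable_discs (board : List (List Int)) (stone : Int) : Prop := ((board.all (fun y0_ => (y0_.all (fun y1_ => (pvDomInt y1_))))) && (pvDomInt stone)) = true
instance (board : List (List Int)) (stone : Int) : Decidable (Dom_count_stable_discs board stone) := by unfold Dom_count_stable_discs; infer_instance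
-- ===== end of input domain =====

-- B replaces A's per-cell eight-direction ray walks by precomputed all-stone flags for every
-- row, column, diagonal and anti-diagonal, then one table lookup per cell (alternative algorithm).

-- ===== PORT A =====
-- board[ny][nx] (A only evaluates it at indices that are in range under Pre_)
def pvCell (board : List (List Int)) (ny nx : Int) : Int :=
  PySem.List.pyGetD (PySem.List.pyGetD board ny []) nx 0

-- the while-loop of A: march from (nx, ny) by (dx, dy) until out of bounds or a non-stone cell
def pvWalk (board : List (List Int)) (stone w h dx dy : Int) : Nat → Int → Int → Bool
  | 0, _, _ => true
  | n+1, nx, ny =>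
    if 0 ≤ nx ∧ nx < w ∧ 0 ≤ ny ∧ ny < h then
      if pvCell board ny nx ≠ stone then false
      else pvWalk board stone w h dx dy n (nx + dx) (ny + dy)
    else true

def pvDirections : List (Int × Int) :=
  [(-1,-1), (-1,0), (-1,1), (0,-1), (0,1), (1,-1), (1,0), (1,1)]

def count_stable_discs (board : List (List Int)) (stone : Int) : Int :=
  let h : Int := board.length
  let w : Int := (board.headD []).length
  (PySem.List.pyRange 0 h 1).foldl (fun acc y =>
    (PySem.List.pyRange 0 w 1).foldl (fun acc x =>
      if pvCell board y x = stone then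
        if pvDirections.all (fun d =>
            pvWalk board stone w h d.1 d.2 ((h + w).toNat + 1) (x + d.1) (y + d.2)) then
          acc + 1
        else acc
      else acc) acc) 0

-- ===== PORT B =====
def pvCellB (board : List (List Int)) (ny nx : Int) : Int :=
  PySem.List.pyGetD (PySem.List.pyGetD board ny []) nx 0

def count_stable_discs_alt (board : List (List Int)) (stone : Int) : Int :=
  let h : Int := board.length
  if h = 0 then 0
  else
    let w : Int := (board.headD []).length
    let row_ok : List Bool := board.map (fun row =>
      (PySem.List.slice row none (some w)).all (fun v => v == stone))
    let col_ok : List Bool := (PySem.List.pyRange 0 w 1).map (fun x =>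
      board.all (fun row => PySem.List.pyGetD row x 0 == stone))
    let diag_ok : List Bool := (PySem.List.pyRange 0 (h + w - 1) 1).map (fun i =>
      (PySem.List.pyRange (max 0 (i - (h - 1))) (min w (i + 1)) 1).all (fun x =>
        pvCellB board (x - i + (h - 1)) x == stone))
    let anti_ok : List Bool := (PySem.List.pyRange 0 (h + w - 1) 1).map (fun i =>
      (PySem.List.pyRange (max 0 (i - (h - 1))) (min w (i + 1)) 1).all (fun x =>
        pvCellB board (i - x) x == stone))
    (PySem.List.pyRange 0 h 1).foldl (fun acc y =>
      (PySem.List.pyRange 0 w 1).foldl (fun acc x =>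
        if (PySem.List.pyGetD row_ok y false && PySem.List.pyGetD col_ok x false
            && PySem.List.pyGetD diag_ok (x - y + (h - 1)) false
            && PySem.List.pyGetD anti_ok (x + y) false) then acc + 1 else acc) acc) 0

-- ===== PRECONDITION & SPEC =====
-- Pre_ excludes exactly the boards on which A raises IndexError: those with some row
-- strictly shorter than row 0 (A reads board[y][x] for every y and every x < len(board[0])).
def Pre_count_stable_discs (board : List (List Int)) (stone : Int) : Prop :=
  ∀ row ∈ board, (board.headD []).length ≤ row.length
instance (board : List (List Int)) (stone : Int) : Decidable (Pre_count_stable_discs board stone) := by unfold Pre_count_stable_discs; infer_instance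

def pvWitness_count_stable_discs : List (List Int) × Int := ([[1, 1], [1, 2]], 1)

def Spec_count_stable_discs (board : List (List Int)) (stone : Int) (out : Int) : Prop := out = count_stable_discs_alt board stone
instance (board : List (List Int)) (stone : Int) (out : Int) : Decidable (Spec_count_stable_discs board stone out) := by unfold Spec_count_stable_discs; infer_instance

-- ===== CLAIM (what is proved, stated in full; the proofs are below) =====
def Claim_equal_count_stable_discs : Prop := ∀ (board : List (List Int)) (stone : Int), Dom_count_stable_discs board stone → Pre_count_stable_discs board stone → Spec_count_stable_discs board stone (count_stable_discs board stone)

-- ===== LEMMAS AND PROOFS =====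

-- in-bounds predicate for a w×h board
def pvInB (w h a b : Int) : Prop := 0 ≤ a ∧ a < w ∧ 0 ≤ b ∧ b < h

-- the four full-line conditions through a cell (x, y)
def pvRow (board : List (List Int)) (stone w y : Int) : Prop :=
  ∀ x' : Int, 0 ≤ x' → x' < w → pvCell board y x' = stone
def pvColP (board : List (List Int)) (stone h x : Int) : Prop :=
  ∀ y' : Int, 0 ≤ y' → y' < h → pvCell board y' x = stone
def pvDiagP (board : List (List Int)) (stone w h x y : Int) : Prop :=
  ∀ t : Int, pvInB w h (x + t) (y + t) → pvCell board (y + t) (x + t) = stone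
def pvAntiP (board : List (List Int)) (stone w h x y : Int) : Prop :=
  ∀ t : Int, pvInB w h (x + t) (y - t) → pvCell board (y - t) (x + t) = stone

lemma pvWalk_char (board : List (List Int)) (stone w h dx dy : Int) :
    ∀ (fuel : Nat) (nx ny : Int),
      (∃ k : Nat, k < fuel ∧ ¬ pvInB w h (nx + k * dx) (ny + k * dy)) →
      (∀ (j k : Nat), j ≤ k → pvInB w h (nx + k * dx) (ny + k * dy) →
        pvInB w h (nx + j * dx) (ny + j * dy)) →
      (pvWalk board stone w h dx dy fuel nx ny = true ↔
        ∀ k : Nat, pvInB w h (nx + k * dx) (ny + k * dy) →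
          pvCell board (ny + k * dy) (nx + k * dx) = stone) := by
  intro fuel
  induction fuel with
  | zero => intro nx ny hex _; obtain ⟨k, hk, _⟩ := hex; omega
  | succ n ih =>
    intro nx ny hex hdc
    by_cases hin : pvInB w h nx ny
    · by_cases hcell : pvCell board ny nx = stone
      · have hin' : 0 ≤ nx ∧ nx < w ∧ 0 ≤ ny ∧ ny < h := hin
        have hstep : pvWalk board stone w h dx dy (n+1) nx ny
            = pvWalk board stone w h dx dy n (nx + dx) (ny + dy) := by
          show (if 0 ≤ nx ∧ nx < w ∧ 0 ≤ ny ∧ ny < h then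
              if pvCell board ny nx ≠ stone then false
              else pvWalk board stone w h dx dy n (nx + dx) (ny + dy)
            else true) = _
          rw [if_pos hin', if_neg (show ¬ pvCell board ny nx ≠ stone by simp [hcell])]
        rw [hstep]
        have hshift : ∀ k : Nat, nx + dx + (k : Int) * dx = nx + ((k+1 : Nat) : Int) * dx ∧
            ny + dy + (k : Int) * dy = ny + ((k+1 : Nat) : Int) * dy := by
          intro k; push_cast; constructor <;> ring
        have hex' : ∃ k : Nat, k < n ∧ ¬ pvInB w h (nx + dx + k * dx) (ny + dy + k * dy) := by
          obtain ⟨k, hk, hnin⟩ := hex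
          match k, hk, hnin with
          | 0, _, hnin => simp at hnin; exact absurd hin hnin
          | (k+1), hk, hnin =>
            exact ⟨k, by omega, by rw [(hshift k).1, (hshift k).2]; exact hnin⟩
        have hdc' : ∀ (j k : Nat), j ≤ k → pvInB w h (nx + dx + k * dx) (ny + dy + k * dy) →
            pvInB w h (nx + dx + j * dx) (ny + dy + j * dy) := by
          intro j k hjk hk
          rw [(hshift j).1, (hshift j).2]
          rw [(hshift k).1, (hshift k).2] at hk
          exact hdc (j+1) (k+1) (by omega) hk
        rw [ih (nx + dx) (ny + dy) hex' hdc']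
        constructor
        · intro hall k hk
          match k with
          | 0 => simpa using hcell
          | (k+1) =>
            rw [← (hshift k).1, ← (hshift k).2] at hk ⊢
            exact hall k hk
        · intro hall k hk
          rw [(hshift k).1, (hshift k).2] at hk ⊢
          exact hall (k+1) hk
      · have hin' : 0 ≤ nx ∧ nx < w ∧ 0 ≤ ny ∧ ny < h := hin
        have : pvWalk board stone w h dx dy (n+1) nx ny = false := by
          show (if 0 ≤ nx ∧ nx < w ∧ 0 ≤ ny ∧ ny < h then
              if pvCell board ny nx ≠ stone then false
              else pvWalk board stone w h dx dy n (nx + dx) (ny + dy)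
            else true) = _
          rw [if_pos hin', if_pos hcell]
        rw [this]
        simp only [Bool.false_eq_true, false_iff]
        intro hall
        exact hcell (by simpa using hall 0 (by simpa using hin))
    · have hin' : ¬ (0 ≤ nx ∧ nx < w ∧ 0 ≤ ny ∧ ny < h) := hin
      have : pvWalk board stone w h dx dy (n+1) nx ny = true := by
        show (if 0 ≤ nx ∧ nx < w ∧ 0 ≤ ny ∧ ny < h then
            if pvCell board ny nx ≠ stone then false
            else pvWalk board stone w h dx dy n (nx + dx) (ny + dy)
          else true) = _
        rw [if_neg hin']
      rw [this]
      simp only [true_iff]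
      intro k hk
      exact absurd (by simpa using hdc 0 k (by omega) hk) hin

lemma pvRay_iff (board : List (List Int)) (stone w h x y dx dy : Int)
    (hx : 0 ≤ x ∧ x < w) (hy : 0 ≤ y ∧ y < h)
    (hdx : dx = -1 ∨ dx = 0 ∨ dx = 1) (hdy : dy = -1 ∨ dy = 0 ∨ dy = 1)
    (hnz : ¬ (dx = 0 ∧ dy = 0)) :
    (pvWalk board stone w h dx dy ((h + w).toNat + 1) (x + dx) (y + dy) = true ↔
      ∀ k : Int, 1 ≤ k → pvInB w h (x + k * dx) (y + k * dy) →
        pvCell board (y + k * dy) (x + k * dx) = stone) := by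
  have hw0 : 0 < w := by omega
  have hh0 : 0 < h := by omega
  have htn : ((h + w).toNat : Int) = h + w := Int.toNat_of_nonneg (by omega)
  have hex : ∃ k : Nat, k < (h + w).toNat + 1 ∧
      ¬ pvInB w h (x + dx + k * dx) (y + dy + k * dy) := by
    refine ⟨(h + w).toNat, by omega, ?_⟩
    unfold pvInB
    rcases hdx with rfl | rfl | rfl <;> rcases hdy with rfl | rfl | rfl <;>
      simp only [mul_neg_one, mul_one, mul_zero] <;> omega
  have hdc : ∀ (j k : Nat), j ≤ k → pvInB w h (x + dx + k * dx) (y + dy + k * dy) →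
      pvInB w h (x + dx + j * dx) (y + dy + j * dy) := by
    intro j k hjk
    unfold pvInB
    have hj : (j : Int) ≤ (k : Int) := by exact_mod_cast hjk
    have hj0 : (0 : Int) ≤ (j : Int) := by positivity
    rcases hdx with rfl | rfl | rfl <;> rcases hdy with rfl | rfl | rfl <;>
      simp only [mul_neg_one, mul_one, mul_zero] <;> omega
  rw [pvWalk_char board stone w h dx dy ((h + w).toNat + 1) (x + dx) (y + dy) hex hdc]
  constructor
  · intro hall k hk hin
    have e1 : x + k * dx = x + dx + ((k - 1).toNat : Int) * dx := by
      rw [Int.toNat_of_nonneg (by omega)]; ring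
    have e2 : y + k * dy = y + dy + ((k - 1).toNat : Int) * dy := by
      rw [Int.toNat_of_nonneg (by omega)]; ring
    rw [e1, e2] at hin ⊢
    exact hall _ hin
  · intro hall k hin
    have e1 : x + dx + (k : Int) * dx = x + ((k : Int) + 1) * dx := by ring
    have e2 : y + dy + (k : Int) * dy = y + ((k : Int) + 1) * dy := by ring
    rw [e1, e2] at hin ⊢
    exact hall _ (by omega) hin

-- A's per-cell test (center stone + eight clear rays) equals the four full-line conditions
lemma pvLines_iff (board : List (List Int)) (stone w h x y : Int)
    (hx : 0 ≤ x ∧ x < w) (hy : 0 ≤ y ∧ y < h) :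
    (pvCell board y x = stone ∧
      pvDirections.all (fun d =>
        pvWalk board stone w h d.1 d.2 ((h + w).toNat + 1) (x + d.1) (y + d.2)) = true) ↔
    (pvRow board stone w y ∧ pvColP board stone h x ∧
      pvDiagP board stone w h x y ∧ pvAntiP board stone w h x y) := by
  simp only [pvDirections, List.all_cons, List.all_nil, Bool.and_eq_true, and_true]
  rw [pvRay_iff board stone w h x y (-1) (-1) hx hy (by norm_num) (by norm_num) (by norm_num),
      pvRay_iff board stone w h x y (-1) 0 hx hy (by norm_num) (by norm_num) (by norm_num),
      pvRay_iff board stone w h x y (-1) 1 hx hy (by norm_num) (by norm_num) (by norm_num),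
      pvRay_iff board stone w h x y 0 (-1) hx hy (by norm_num) (by norm_num) (by norm_num),
      pvRay_iff board stone w h x y 0 1 hx hy (by norm_num) (by norm_num) (by norm_num),
      pvRay_iff board stone w h x y 1 (-1) hx hy (by norm_num) (by norm_num) (by norm_num),
      pvRay_iff board stone w h x y 1 0 hx hy (by norm_num) (by norm_num) (by norm_num),
      pvRay_iff board stone w h x y 1 1 hx hy (by norm_num) (by norm_num) (by norm_num)]
  constructor
  · rintro ⟨hc, h11, h10, h12, h01, h02, h21, h20, h22⟩
    refine ⟨?_, ?_, ?_, ?_⟩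
    · intro x' h0 h1
      rcases lt_trichotomy x' x with hlt | rfl | hgt
      · have e1 : x + (x - x') * (-1) = x' := by ring
        have e2 : y + (x - x') * 0 = y := by ring
        have := h10 (x - x') (by omega)
        rw [e1, e2] at this
        exact this ⟨h0, h1, hy.1, hy.2⟩
      · exact hc
      · have e1 : x + (x' - x) * 1 = x' := by ring
        have e2 : y + (x' - x) * 0 = y := by ring
        have := h20 (x' - x) (by omega)
        rw [e1, e2] at this
        exact this ⟨h0, h1, hy.1, hy.2⟩
    · intro y' h0 h1
      rcases lt_trichotomy y' y with hlt | rfl | hgt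
      · have e1 : x + (y - y') * 0 = x := by ring
        have e2 : y + (y - y') * (-1) = y' := by ring
        have := h01 (y - y') (by omega)
        rw [e1, e2] at this
        exact this ⟨hx.1, hx.2, h0, h1⟩
      · exact hc
      · have e1 : x + (y' - y) * 0 = x := by ring
        have e2 : y + (y' - y) * 1 = y' := by ring
        have := h02 (y' - y) (by omega)
        rw [e1, e2] at this
        exact this ⟨hx.1, hx.2, h0, h1⟩
    · intro t hin
      rcases lt_trichotomy t 0 with hlt | rfl | hgt
      · have e1 : x + (-t) * (-1) = x + t := by ring
        have e2 : y + (-t) * (-1) = y + t := by ring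
        have := h11 (-t) (by omega)
        rw [e1, e2] at this
        exact this hin
      · simpa using hc
      · have e1 : x + t * 1 = x + t := by ring
        have e2 : y + t * 1 = y + t := by ring
        have := h22 t (by omega)
        rw [e1, e2] at this
        exact this hin
    · intro t hin
      rcases lt_trichotomy t 0 with hlt | rfl | hgt
      · have e1 : x + (-t) * (-1) = x + t := by ring
        have e2 : y + (-t) * 1 = y - t := by ring
        have := h12 (-t) (by omega)
        rw [e1, e2] at this
        exact this hin
      · simpa using hc
      · have e1 : x + t * 1 = x + t := by ring
        have e2 : y + t * (-1) = y - t := by ring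
        have := h21 t (by omega)
        rw [e1, e2] at this
        exact this hin
  · rintro ⟨hr, hcl, hd, ha⟩
    have hc : pvCell board y x = stone := hr x hx.1 hx.2
    refine ⟨hc, ?_, ?_, ?_, ?_, ?_, ?_, ?_, ?_⟩
    · intro k hk hin
      have e1 : x + k * (-1) = x + (-k) := by ring
      have e2 : y + k * (-1) = y + (-k) := by ring
      rw [e1, e2] at hin ⊢
      exact hd (-k) hin
    · intro k hk hin
      have e1 : x + k * (-1) = x - k := by ring
      have e2 : y + k * 0 = y := by ring
      rw [e1, e2] at hin ⊢
      exact hr (x - k) hin.1 hin.2.1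
    · intro k hk hin
      have e1 : x + k * (-1) = x + (-k) := by ring
      have e2 : y + k * 1 = y - (-k) := by ring
      rw [e1, e2] at hin ⊢
      exact ha (-k) hin
    · intro k hk hin
      have e1 : x + k * 0 = x := by ring
      have e2 : y + k * (-1) = y - k := by ring
      rw [e1, e2] at hin ⊢
      exact hcl (y - k) hin.2.2.1 hin.2.2.2
    · intro k hk hin
      have e1 : x + k * 0 = x := by ring
      rw [e1] at hin ⊢
      exact hcl (y + k * 1) hin.2.2.1 hin.2.2.2
    · intro k hk hin
      have e2 : y + k * (-1) = y - k := by ring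
      have e1 : x + k * 1 = x + k := by ring
      rw [e1, e2] at hin ⊢
      exact ha k hin
    · intro k hk hin
      have e2 : y + k * 0 = y := by ring
      rw [e2] at hin ⊢
      exact hr (x + k * 1) hin.1 hin.2.1
    · intro k hk hin
      have e1 : x + k * 1 = x + k := by ring
      have e2 : y + k * 1 = y + k := by ring
      rw [e1, e2] at hin ⊢
      exact hd k hin

lemma pvGetD_nonneg_getD {α : Type} [Inhabited α] (xs : List α) (i : Int) (d : α) (h : 0 ≤ i) :
    PySem.List.pyGetD xs i d = xs.getD i.toNat d := by
  obtain ⟨n, rfl⟩ := Int.eq_ofNat_of_zero_le h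
  simp [PySem.List.pyGetD_natCast]

lemma pvCell_nonneg (board : List (List Int)) (y x : Int) (hy : 0 ≤ y) (hx : 0 ≤ x) :
    pvCell board y x = (board.getD y.toNat []).getD x.toNat 0 := by
  unfold pvCell
  rw [pvGetD_nonneg_getD _ _ _ hy, pvGetD_nonneg_getD _ _ _ hx]

-- evaluation of B's four table lookups at a cell (x, y)
lemma pvRowOk_iff (board : List (List Int)) (stone y : Int)
    (hpre : ∀ row ∈ board, (board.headD []).length ≤ row.length)
    (hy : 0 ≤ y ∧ y < (board.length : Int)) :
    (PySem.List.pyGetD (board.map (fun row =>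
        (PySem.List.slice row none (some ((board.headD []).length : Int))).all
          (fun v => v == stone))) y false = true) ↔
      pvRow board stone ((board.headD []).length : Int) y := by
  have hyn : y.toNat < board.length := by omega
  set W := (board.headD []).length with hW
  set r := board[y.toNat] with hr
  have hrmem : r ∈ board := List.getElem_mem hyn
  have hrlen : W ≤ r.length := hpre r hrmem
  rw [pvGetD_nonneg_getD _ _ _ hy.1]
  rw [List.getD_eq_getElem _ _ (show y.toNat < (board.map (fun row =>
      (PySem.List.slice row none (some (W : Int))).all (fun v => v == stone))).length by
    simpa using hyn)]
  rw [List.getElem_map]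
  rw [PySem.List.slice_to_natCast]
  rw [List.all_eq_true]
  constructor
  · intro hall x' h0 h1
    have hx'W : x'.toNat < W := by omega
    have hx'r : x'.toNat < r.length := by omega
    have hmem : r[x'.toNat] ∈ (board[y.toNat]).take W := by
      have hlt : x'.toNat < ((board[y.toNat]).take W).length := by
        simp [← hr]; omega
      have := List.getElem_mem hlt
      rwa [List.getElem_take] at this
    have := hall _ hmem
    rw [beq_iff_eq] at this
    rw [pvCell_nonneg board y x' hy.1 h0, List.getD_eq_getElem _ _ hyn, ← hr,
        List.getD_eq_getElem _ _ hx'r]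
    exact this
  · intro hR v hv
    obtain ⟨i, hi, rfl⟩ := List.mem_iff_getElem.mp hv
    have hiW : i < W := by
      have := hi; simp at this; omega
    have hir : i < r.length := by omega
    rw [List.getElem_take]
    rw [beq_iff_eq]
    have := hR (i : Int) (by positivity) (by exact_mod_cast hiW)
    rw [pvCell_nonneg board y (i : Int) hy.1 (by positivity), List.getD_eq_getElem _ _ hyn] at this
    simp only [Int.toNat_natCast] at this
    rw [List.getD_eq_getElem _ _ hir] at this
    exact this

lemma pvCellB_eq (board : List (List Int)) (ny nx : Int) :
    pvCellB board ny nx = pvCell board ny nx := rfl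

lemma pvColOk_iff (board : List (List Int)) (stone x : Int)
    (hx : 0 ≤ x ∧ x < ((board.headD []).length : Int)) :
    (PySem.List.pyGetD ((PySem.List.pyRange 0 ((board.headD []).length : Int) 1).map (fun x =>
        board.all (fun row => PySem.List.pyGetD row x 0 == stone))) x false = true) ↔
      pvColP board stone (board.length : Int) x := by
  rw [PySem.List.pyGetD_map_pyRange_of_nonneg _ ((board.headD []).length : Int) x false hx.1 hx.2]
  rw [List.all_eq_true]
  constructor
  · intro hall y' h0 h1
    have hyn : y'.toNat < board.length := by omega
    have := hall board[y'.toNat] (List.getElem_mem hyn)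
    rw [beq_iff_eq, pvGetD_nonneg_getD _ _ _ hx.1] at this
    rw [pvCell_nonneg board y' x h0 hx.1, List.getD_eq_getElem _ _ hyn]
    exact this
  · intro hC row hrow
    obtain ⟨i, hi, rfl⟩ := List.mem_iff_getElem.mp hrow
    rw [beq_iff_eq, pvGetD_nonneg_getD _ _ _ hx.1]
    have := hC (i : Int) (by positivity) (by exact_mod_cast hi)
    rw [pvCell_nonneg board (i : Int) x (by positivity) hx.1,
        List.getD_eq_getElem board [] (show ((i : Int)).toNat < board.length by
          simpa using hi)] at this
    simp only [Int.toNat_natCast] at this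
    exact this

lemma pvDiagOk_iff (board : List (List Int)) (stone x y : Int)
    (hx : 0 ≤ x ∧ x < ((board.headD []).length : Int))
    (hy : 0 ≤ y ∧ y < (board.length : Int)) :
    (PySem.List.pyGetD ((PySem.List.pyRange 0 ((board.length : Int) + ((board.headD []).length : Int) - 1) 1).map (fun i =>
        (PySem.List.pyRange (max 0 (i - ((board.length : Int) - 1))) (min ((board.headD []).length : Int) (i + 1)) 1).all (fun x =>
          pvCellB board (x - i + ((board.length : Int) - 1)) x == stone)))
        (x - y + ((board.length : Int) - 1)) false = true) ↔
      pvDiagP board stone ((board.headD []).length : Int) (board.length : Int) x y := by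
  rw [PySem.List.pyGetD_map_pyRange_of_nonneg _
        ((board.length : Int) + ((board.headD []).length : Int) - 1)
        (x - y + ((board.length : Int) - 1)) false (by omega) (by omega)]
  rw [List.all_eq_true]
  constructor
  · intro hall t hin
    obtain ⟨h1, h2, h3, h4⟩ := hin
    have hmem : (x + t) ∈ PySem.List.pyRange
        (max 0 ((x - y + ((board.length : Int) - 1)) - ((board.length : Int) - 1)))
        (min ((board.headD []).length : Int) ((x - y + ((board.length : Int) - 1)) + 1)) 1 := by
      rw [PySem.List.mem_pyRange_one]; omega
    have := hall _ hmem
    rw [beq_iff_eq, pvCellB_eq] at this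
    have e : (x + t) - (x - y + ((board.length : Int) - 1)) + ((board.length : Int) - 1)
        = y + t := by ring
    rw [e] at this
    exact this
  · intro hD v hv
    rw [PySem.List.mem_pyRange_one] at hv
    rw [beq_iff_eq, pvCellB_eq]
    have e : v - (x - y + ((board.length : Int) - 1)) + ((board.length : Int) - 1)
        = y + (v - x) := by ring
    rw [e]
    have hin : pvInB ((board.headD []).length : Int) (board.length : Int)
        (x + (v - x)) (y + (v - x)) := by
      unfold pvInB; constructor; omega; constructor; omega; constructor; omega; omega
    have := hD (v - x) hin
    have e2 : x + (v - x) = v := by ring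
    rw [e2] at this
    exact this

lemma pvAntiOk_iff (board : List (List Int)) (stone x y : Int)
    (hx : 0 ≤ x ∧ x < ((board.headD []).length : Int))
    (hy : 0 ≤ y ∧ y < (board.length : Int)) :
    (PySem.List.pyGetD ((PySem.List.pyRange 0 ((board.length : Int) + ((board.headD []).length : Int) - 1) 1).map (fun i =>
        (PySem.List.pyRange (max 0 (i - ((board.length : Int) - 1))) (min ((board.headD []).length : Int) (i + 1)) 1).all (fun x =>
          pvCellB board (i - x) x == stone)))
        (x + y) false = true) ↔
      pvAntiP board stone ((board.headD []).length : Int) (board.length : Int) x y := by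
  rw [PySem.List.pyGetD_map_pyRange_of_nonneg _
        ((board.length : Int) + ((board.headD []).length : Int) - 1)
        (x + y) false (by omega) (by omega)]
  rw [List.all_eq_true]
  constructor
  · intro hall t hin
    obtain ⟨h1, h2, h3, h4⟩ := hin
    have hmem : (x + t) ∈ PySem.List.pyRange
        (max 0 ((x + y) - ((board.length : Int) - 1)))
        (min ((board.headD []).length : Int) ((x + y) + 1)) 1 := by
      rw [PySem.List.mem_pyRange_one]; omega
    have := hall _ hmem
    rw [beq_iff_eq, pvCellB_eq] at this
    have e : (x + y) - (x + t) = y - t := by ring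
    rw [e] at this
    exact this
  · intro hA v hv
    rw [PySem.List.mem_pyRange_one] at hv
    rw [beq_iff_eq, pvCellB_eq]
    have e : (x + y) - v = y - (v - x) := by ring
    rw [e]
    have hin : pvInB ((board.headD []).length : Int) (board.length : Int)
        (x + (v - x)) (y - (v - x)) := by
      unfold pvInB; constructor; omega; constructor; omega; constructor; omega; omega
    have := hA (v - x) hin
    have e2 : x + (v - x) = v := by ring
    rw [e2] at this
    exact this


-- ===== VERDICT (by name: the statement is the Claim_ definition above) =====
set_option maxHeartbeats 1600000 in
theorem count_stable_discs_spec : Claim_equal_count_stable_discs := by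
  intro board stone hdom hpre
  unfold Spec_count_stable_discs
  by_cases hb : board = []
  · subst hb
    simp [count_stable_discs, count_stable_discs_alt]
  · have hlen0 : board.length ≠ 0 := by simpa using hb
    have hh0 : ((board.length : Int)) ≠ 0 := by exact_mod_cast hlen0
    simp only [count_stable_discs, count_stable_discs_alt]
    rw [if_neg hh0]
    apply PySem.List.foldl_congr_mem
    intro acc y hymem
    rw [PySem.List.mem_pyRange_one] at hymem
    dsimp only
    apply PySem.List.foldl_congr_mem
    intro acc2 x hxmem
    rw [PySem.List.mem_pyRange_one] at hxmem
    dsimp only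
    have hA := pvLines_iff board stone ((board.headD []).length : Int) (board.length : Int)
      x y hxmem hymem
    have h1 := pvRowOk_iff board stone y hpre hymem
    have h2 := pvColOk_iff board stone x hxmem
    have h3 := pvDiagOk_iff board stone x y hxmem hymem
    have h4 := pvAntiOk_iff board stone x y hxmem hymem
    have hBc : (PySem.List.pyGetD (board.map (fun row =>
          (PySem.List.slice row none (some ((board.headD []).length : Int))).all
            (fun v => v == stone))) y false
        && PySem.List.pyGetD ((PySem.List.pyRange 0 ((board.headD []).length : Int) 1).map
            (fun x => board.all (fun row => PySem.List.pyGetD row x 0 == stone))) x false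
        && PySem.List.pyGetD ((PySem.List.pyRange 0
              ((board.length : Int) + ((board.headD []).length : Int) - 1) 1).map (fun i =>
            (PySem.List.pyRange (max 0 (i - ((board.length : Int) - 1)))
                (min ((board.headD []).length : Int) (i + 1)) 1).all (fun x =>
              pvCellB board (x - i + ((board.length : Int) - 1)) x == stone)))
            (x - y + ((board.length : Int) - 1)) false
        && PySem.List.pyGetD ((PySem.List.pyRange 0
              ((board.length : Int) + ((board.headD []).length : Int) - 1) 1).map (fun i =>
            (PySem.List.pyRange (max 0 (i - ((board.length : Int) - 1)))
                (min ((board.headD []).length : Int) (i + 1)) 1).all (fun x =>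
              pvCellB board (i - x) x == stone))) (x + y) false) = true ↔
        (pvRow board stone ((board.headD []).length : Int) y
          ∧ pvColP board stone (board.length : Int) x
          ∧ pvDiagP board stone ((board.headD []).length : Int) (board.length : Int) x y
          ∧ pvAntiP board stone ((board.headD []).length : Int) (board.length : Int) x y) := by
      simp only [Bool.and_eq_true]
      rw [h1, h2, h3, h4]
      constructor
      · rintro ⟨⟨⟨a, b⟩, c⟩, d⟩; exact ⟨a, b, c, d⟩
      · rintro ⟨a, b, c, d⟩; exact ⟨⟨⟨a, b⟩, c⟩, d⟩
    by_cases hc : pvCell board y x = stone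
    · by_cases hall : pvDirections.all (fun d =>
          pvWalk board stone ((board.headD []).length : Int) (board.length : Int) d.1 d.2
            (((board.length : Int) + ((board.headD []).length : Int)).toNat + 1)
            (x + d.1) (y + d.2)) = true
      · rw [if_pos hc, if_pos hall, if_pos (hBc.mpr (hA.mp ⟨hc, hall⟩))]
      · rw [if_pos hc, if_neg hall, if_neg (fun hbc => hall (hA.mpr (hBc.mp hbc)).2)]
    · rw [if_neg hc, if_neg (fun hbc => hc (hA.mpr (hBc.mp hbc)).1)]
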